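-- pv_equiv track=rewrite | github.com/Torousseau/My-projects | lewthwaite.py | newBoard
-- ===== SOURCE A (Python) =====
-- def newBoard(n):
--     board = [[" " for i in range(n)] for i in range(n)]
--     player = 2
--     for i in range(n):
--         for j in range(n):
--             board[i][j] = player
--             player = (player % 2) + 1
--     board[n // 2][n // 2] = 0
--     return board
-- ===== SOURCE B (Python) =====
-- def newBoard(n):
--     flat = [2, 1] * ((n * n + 1) // 2)
--     board = [flat[r * n : r * n + n] for r in range(n)]
--     board[n // 2][n // 2] = 0
--     return board
-- ===== Notes on version B (the rewrite author's own statement) =====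
-- stated objective: alternative
-- what changed: Instead of sweeping a pre-built placeholder board cell by cell with a mutable player toggle, B builds one flat alternating sequence by list repetition ([2,1]*k) and chunks it into rows by slicing, then zeroes the center.
-- outside the precondition, e.g. on newBoard(0): A raises IndexError, B raises IndexError
import Mathlib
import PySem

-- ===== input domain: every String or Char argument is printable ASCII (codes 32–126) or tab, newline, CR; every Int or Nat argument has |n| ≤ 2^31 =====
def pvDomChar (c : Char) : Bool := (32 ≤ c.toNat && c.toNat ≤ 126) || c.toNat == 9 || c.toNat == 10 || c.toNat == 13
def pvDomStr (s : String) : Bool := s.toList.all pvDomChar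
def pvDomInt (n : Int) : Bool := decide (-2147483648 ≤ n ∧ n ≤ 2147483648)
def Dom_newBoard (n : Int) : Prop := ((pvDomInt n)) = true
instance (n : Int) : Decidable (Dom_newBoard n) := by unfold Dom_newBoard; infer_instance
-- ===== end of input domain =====

-- B replaces A's cell-by-cell sweep with a mutable player toggle by one flat repeated
-- sequence [2,1]*k chunked into rows by slicing (objective: alternative).

-- ===== PORT A =====
-- player = (player % 2) + 1
def pvToggle (p : Int) : Int := PySem.Int.mod p 2 + 1

-- Port of A. Python fills the board with " " placeholders; for n ≥ 1 (Pre_) every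
-- cell is overwritten by the nested loops before return, so the placeholder is 0 here.
def newBoard (n : Int) : List (List Int) :=
  (((List.range n.toNat).foldl (fun (st : List (List Int) × Int) i =>
      (List.range n.toNat).foldl (fun (st : List (List Int) × Int) j =>
        (st.1.modify i (fun r => r.set j st.2), pvToggle st.2)) st)
    ((List.range n.toNat).map (fun _ => (List.range n.toNat).map (fun _ => (0:Int))), 2)).1).modify
    (PySem.Int.floordiv n 2).toNat (fun r => r.set (PySem.Int.floordiv n 2).toNat 0)

-- ===== PORT B =====
-- flat = [2, 1] * ((n*n+1)//2);  board = [flat[r*n : r*n+n] for r in range(n)];  center = 0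
def newBoard_alt (n : Int) : List (List Int) :=
  let flat : List Int := (List.replicate (PySem.Int.floordiv (n*n+1) 2).toNat ([2, 1] : List Int)).flatten
  (((List.range n.toNat).map (fun (r : Nat) =>
      PySem.List.slice flat (some ((r:Int) * n)) (some ((r:Int) * n + n)))).modify
    (PySem.Int.floordiv n 2).toNat (fun r => r.set (PySem.Int.floordiv n 2).toNat 0))

-- ===== PRECONDITION & SPEC =====
-- For n ≤ 0 the board is empty and board[n // 2][n // 2] = 0 raises IndexError in both programs.
def Pre_newBoard (n : Int) : Prop := 1 ≤ n
instance (n : Int) : Decidable (Pre_newBoard n) := by unfold Pre_newBoard; infer_instance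
def pvWitness_newBoard : Int := (3)

def Spec_newBoard (n : Int) (out : List (List Int)) : Prop := out = newBoard_alt n
instance (n : Int) (out : List (List Int)) : Decidable (Spec_newBoard n out) := by unfold Spec_newBoard; infer_instance

-- ===== CLAIM (what is proved, stated in full; the proofs are below) =====
def Claim_equal_newBoard : Prop := ∀ (n : Int), Dom_newBoard n → Pre_newBoard n → Spec_newBoard n (newBoard n)

-- ===== LEMMAS AND PROOFS =====

-- the player value before the k-th write (row-major order), starting at 2
def pvV (k : Nat) : Int := if k % 2 = 0 then 2 else 1

theorem pvToggle_v (k : Nat) : pvToggle (pvV k) = pvV (k+1) := by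
  rcases Nat.mod_two_eq_zero_or_one k with h | h
  · have h1 : (k+1) % 2 = 1 := by omega
    simp [pvToggle, pvV, h, h1]
  · have h1 : (k+1) % 2 = 0 := by omega
    simp [pvToggle, pvV, h, h1]

theorem pvModify_modify {α : Type} (l : List α) (i : Nat) (f g : α → α) :
    (l.modify i f).modify i g = l.modify i (fun x => g (f x)) := by
  apply List.ext_getElem (by simp)
  intro j h1 h2
  simp only [List.getElem_modify]
  split <;> rfl

theorem pvInner_fold (N i : Nat) (b : List (List Int)) (k : Nat) :
    (List.range N).foldl (fun (st : List (List Int) × Int) j =>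
        (st.1.modify i (fun r => r.set j st.2), pvToggle st.2)) (b, pvV k)
    = (b.modify i (fun r => (List.range N).foldl (fun r j => r.set j (pvV (k + j))) r),
       pvV (k + N)) := by
  induction N with
  | zero =>
    simp only [List.range_zero, List.foldl_nil, Nat.add_zero]
    rw [show (fun r : List Int => r) = id from rfl, List.modify_id]
  | succ N ih =>
    rw [List.range_succ]
    simp only [List.foldl_append, List.foldl_cons, List.foldl_nil]
    rw [ih, pvModify_modify, pvToggle_v]
    rfl

theorem pvFill_eq (N k : Nat) (r : List Int) (h : N ≤ r.length) :
    (List.range N).foldl (fun r j => r.set j (pvV (k + j))) r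
    = (List.range N).map (fun j => pvV (k + j)) ++ r.drop N := by
  induction N with
  | zero => simp
  | succ N ih =>
    rw [List.range_succ]
    simp only [List.foldl_append, List.foldl_cons, List.foldl_nil]
    rw [ih (by omega), List.set_append]
    have hlen : ((List.range N).map (fun j => pvV (k + j))).length = N := by simp
    have hd : (List.drop N r).set 0 (pvV (k + N)) = pvV (k+N) :: List.drop (N+1) r := by
      rw [List.drop_eq_getElem_cons (by omega : N < r.length), List.set_cons_zero]
    rw [hlen, if_neg (lt_irrefl N), Nat.sub_self, hd]
    simp

theorem pvOuter_fold (N M : Nat) (hM : M ≤ N) :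
    (List.range M).foldl (fun (st : List (List Int) × Int) i =>
        (List.range N).foldl (fun (st : List (List Int) × Int) j =>
          (st.1.modify i (fun r => r.set j st.2), pvToggle st.2)) st)
      ((List.range N).map (fun _ => (List.range N).map (fun _ => (0:Int))), pvV 0)
    = ((List.range N).map (fun i =>
          if i < M then (List.range N).map (fun j => pvV (i*N + j))
          else (List.range N).map (fun _ => (0:Int))),
       pvV (M*N)) := by
  induction M with
  | zero => simp
  | succ M ih =>
    rw [List.range_succ]
    simp only [List.foldl_append, List.foldl_cons, List.foldl_nil]
    rw [ih (by omega), pvInner_fold]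
    refine congrArg₂ Prod.mk ?_ ?_
    · apply List.ext_getElem (by simp)
      intro x h1 h2
      simp only [List.getElem_modify, List.getElem_map, List.getElem_range]
      by_cases hx : M = x
      · subst hx
        rw [if_pos rfl, if_neg (lt_irrefl M), if_pos (Nat.lt_succ_self M)]
        rw [pvFill_eq N (M*N) _ (by simp)]
        simp
      · rw [if_neg hx]
        have hx' : x ≠ M := fun h => hx h.symm
        by_cases hlt : x < M
        · rw [if_pos hlt, if_pos (by omega)]
        · rw [if_neg hlt, if_neg (by omega)]
    · show pvV (M*N + N) = pvV ((M+1)*N)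
      congr 1
      ring

-- B's flat repeated list is exactly the row-major player sequence
theorem pvFlat_eq (m : Nat) :
    (List.replicate m ([2, 1] : List Int)).flatten = (List.range (2*m)).map pvV := by
  induction m with
  | zero => simp
  | succ m ih =>
    rw [List.replicate_succ', List.flatten_append, ih]
    have h2 : 2*(m+1) = (2*m + 1) + 1 := by ring
    rw [h2, List.range_succ, List.range_succ]
    have hv0 : pvV (2*m) = 2 := by simp [pvV, Nat.mul_mod_right]
    have hv1 : pvV (2*m + 1) = 1 := by
      have : (2*m + 1) % 2 = 1 := by omega
      simp [pvV, this]
    simp [hv0, hv1]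

theorem pvSlice_row (a N L : Nat) (h : a + N ≤ L) :
    (((List.range L).map pvV).drop a).take N = (List.range N).map (fun j => pvV (a + j)) := by
  apply List.ext_getElem (by simp; omega)
  intro j h1 h2
  simp

-- ===== VERDICT (by name: the statement is the Claim_ definition above) =====
theorem newBoard_spec : Claim_equal_newBoard := by
  intro n _ hpre
  have hp1 : 1 ≤ n := hpre
  have hn : ((n.toNat : Int)) = n := Int.toNat_of_nonneg (by omega)
  have H := pvOuter_fold n.toNat n.toNat le_rfl
  rw [show pvV 0 = (2:Int) from by decide] at H
  unfold Spec_newBoard newBoard newBoard_alt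
  rw [H]
  simp only []
  congr 1
  -- the unmodified boards agree row by row
  have hm : (PySem.Int.floordiv (n*n+1) 2).toNat = (n.toNat * n.toNat + 1) / 2 := by
    rw [show n*n+1 = ((n.toNat * n.toNat + 1 : Nat) : Int) by push_cast [hn]; ring,
        show ((2:Int)) = ((2:Nat):Int) by norm_num, PySem.Int.floordiv_natCast,
        Int.toNat_natCast]
  apply List.ext_getElem (by simp)
  intro r h1 h2
  simp only [List.getElem_map, List.getElem_range]
  rw [if_pos (by simpa using h1), hm, pvFlat_eq]
  have hcast : ((r:Int) * n) = ((r * n.toNat : Nat) : Int) := by push_cast [hn]; ring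
  have hcast2 : ((r:Int) * n + n) = ((r * n.toNat : Nat) : Int) + ((n.toNat : Nat) : Int) := by
    push_cast [hn]; ring
  rw [hcast2, hcast, PySem.List.slice_natCast_add]
  have hr : r < n.toNat := by simpa using h1
  have hb : r * n.toNat + n.toNat ≤ 2 * ((n.toNat * n.toNat + 1) / 2) := by
    have h3 : (r + 1) * n.toNat ≤ n.toNat * n.toNat :=
      Nat.mul_le_mul_right n.toNat (Nat.succ_le_of_lt hr)
    have h4 := Nat.mod_add_div (n.toNat * n.toNat + 1) 2
    have h5 : (n.toNat * n.toNat + 1) % 2 < 2 := Nat.mod_lt _ (by omega)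
    have h6 : (r + 1) * n.toNat = r * n.toNat + n.toNat := by ring
    omega
  rw [pvSlice_row (r * n.toNat) n.toNat (2 * ((n.toNat * n.toNat + 1) / 2)) hb]
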